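-- pv_equiv track=rewrite | github.com/wpadala420/PersonDataSearcher | functions/search.py | get_hashtag_from_line
-- ===== SOURCE A (Python) =====
-- def get_hashtag_from_line(line):
--     result = ''
--     hash_index = 0
--     for char_ in range(len(line)):
--         if line[char_] == '#':
--             hash_index = char_
--             break
--     space_count = 0
--     for index in range(hash_index + 1, len(line)):
--         if space_count == 3:
--             break
--         if line[index] != ' ':
--             result = result + line[index]
--         else:
--             space_count = space_count + 1
--     return result
-- ===== SOURCE B (Python) =====
-- def get_hashtag_from_line(line):
--     hash_index = 0
--     for i, ch in enumerate(line):
--         if ch == '#':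
--             hash_index = i
--             break
--     return ''.join(line[hash_index + 1:].split(' ')[:3])
-- ===== Notes on version B (the rewrite author's own statement) =====
-- stated objective: simpler
-- what changed: The character-by-character counting loop with result/space_count state is replaced by slicing off the tail after the hash, splitting it on single spaces and joining the first three segments; only the hash-finding scan is kept.
import Mathlib
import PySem

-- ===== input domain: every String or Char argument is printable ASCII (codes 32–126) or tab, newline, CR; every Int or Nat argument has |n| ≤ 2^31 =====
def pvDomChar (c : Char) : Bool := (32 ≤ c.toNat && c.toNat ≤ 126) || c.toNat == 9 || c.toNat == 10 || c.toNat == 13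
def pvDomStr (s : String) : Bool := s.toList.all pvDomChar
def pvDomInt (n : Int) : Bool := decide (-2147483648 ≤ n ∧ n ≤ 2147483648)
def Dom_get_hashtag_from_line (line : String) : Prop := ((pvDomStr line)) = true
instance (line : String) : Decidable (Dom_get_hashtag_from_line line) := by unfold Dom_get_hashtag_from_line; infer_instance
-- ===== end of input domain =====

-- B keeps only the hash-finding scan of A and replaces the counting loop by split/take/join; return value only, no mutation.

-- ===== PORT A =====
-- first loop of A (shared by Source B, which keeps the same scan): index of the first '#', default 0
def pvFindHash : List Char → Nat → Nat
  | [], _ => 0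
  | c :: cs, i => if c = '#' then i else pvFindHash cs (i + 1)

-- second loop of A: for index in range(hash_index+1, len(line)) with result/space_count state and break
def pvCollect : List Char → List Char → Nat → List Char
  | [], res, _ => res
  | c :: cs, res, sc =>
    if sc = 3 then res
    else if c ≠ ' ' then pvCollect cs (res ++ [c]) sc
    else pvCollect cs res (sc + 1)

def get_hashtag_from_line (line : String) : String :=
  let cs := line.toList
  let hi := pvFindHash cs 0
  -- range(hash_index+1, len(line)) indexing line[index] = the tail after position hi (hi+1 ≥ 0)
  String.ofList (pvCollect (cs.drop (hi + 1)) [] 0)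

-- ===== PORT B =====
def get_hashtag_from_line_alt (line : String) : String :=
  let cs := line.toList
  let hi := pvFindHash cs 0   -- Source B keeps A's enumerate scan for the first '#', default 0
  -- line[hi+1:] with hi+1 ≥ 0 is the tail; then split(' '), take 3, ''.join
  String.ofList (PySem.Chars.join [] ((PySem.Chars.splitOn (cs.drop (hi + 1)) [' ']).take 3))

-- ===== PRECONDITION & SPEC =====
def Spec_get_hashtag_from_line (line : String) (out : String) : Prop := out = get_hashtag_from_line_alt line
instance (line : String) (out : String) : Decidable (Spec_get_hashtag_from_line line out) := by unfold Spec_get_hashtag_from_line; infer_instance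

-- ===== CLAIM (what is proved, stated in full; the proofs are below) =====
def Claim_equal_get_hashtag_from_line : Prop := ∀ (line : String), Dom_get_hashtag_from_line line → Spec_get_hashtag_from_line line (get_hashtag_from_line line)

-- ===== LEMMAS AND PROOFS =====

-- structural form of splitting on a single space
def pvSplitSp : List Char → List (List Char)
  | [] => [[]]
  | c :: cs => if c = ' ' then [] :: pvSplitSp cs else (pvSplitSp cs).modifyHead (c :: ·)

theorem pvSplitSp_ne_nil (l : List Char) : pvSplitSp l ≠ [] := by
  cases l with
  | nil => simp [pvSplitSp]
  | cons c cs =>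
    simp only [pvSplitSp]
    split <;> simp [List.modifyHead_eq_nil_iff]
    · exact pvSplitSp_ne_nil cs

theorem pvSplitOn_go_eq (l : List Char) : ∀ (fuel : Nat) (cur : List Char) (acc : List (List Char)),
    l.length < fuel →
    PySem.Chars.splitOn.go [' '] fuel l cur acc
      = acc.reverse ++ (pvSplitSp l).modifyHead (cur.reverse ++ ·) := by
  induction l with
  | nil =>
    intro fuel cur acc h
    cases fuel with
    | zero => omega
    | succ f => simp [PySem.Chars.splitOn.go, pvSplitSp]
  | cons c cs ih =>
    intro fuel cur acc h
    cases fuel with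
    | zero => omega
    | succ f =>
      by_cases hc : c = ' '
      · subst hc
        rw [show PySem.Chars.splitOn.go [' '] (f+1) (' ' :: cs) cur acc
              = PySem.Chars.splitOn.go [' '] f cs [] (cur.reverse :: acc) by
            simp [PySem.Chars.splitOn.go, List.isPrefixOf]]
        rw [ih f [] (cur.reverse :: acc) (by simpa using Nat.lt_of_succ_lt_succ h)]
        simp only [pvSplitSp, if_pos]
        cases h' : pvSplitSp cs <;> simp [List.modifyHead]
      · rw [show PySem.Chars.splitOn.go [' '] (f+1) (c :: cs) cur acc
              = PySem.Chars.splitOn.go [' '] f cs (c :: cur) acc by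
            have hp : List.isPrefixOf [' '] (c :: cs) = false := by
              simp [List.isPrefixOf, Ne.symm hc]
            simp [PySem.Chars.splitOn.go, hp]]
        rw [ih f (c :: cur) acc (by simpa using Nat.lt_of_succ_lt_succ h)]
        obtain ⟨h0, t, ht⟩ := List.exists_cons_of_ne_nil (pvSplitSp_ne_nil cs)
        simp [pvSplitSp, hc, ht, List.modifyHead]

theorem pvSplitOn_eq (l : List Char) : PySem.Chars.splitOn l [' '] = pvSplitSp l := by
  rw [PySem.Chars.splitOn, pvSplitOn_go_eq l (l.length + 1) [] [] (by omega)]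
  obtain ⟨h0, t, ht⟩ := List.exists_cons_of_ne_nil (pvSplitSp_ne_nil l)
  simp [ht, List.modifyHead]

theorem pvJoinNil (l : List (List Char)) : PySem.Chars.join [] l = l.flatten := by
  induction l with
  | nil => simp [PySem.Chars.join, List.intercalate]
  | cons a t ih =>
    cases t with
    | nil => simp [PySem.Chars.join, List.intercalate]
    | cons b t' =>
      rw [PySem.Chars.join_cons_cons, ih]
      simp [List.flatten_cons]

theorem pvCollect_eq (l : List Char) : ∀ (res : List Char) (sc : Nat), sc ≤ 3 →
    pvCollect l res sc = res ++ ((pvSplitSp l).take (3 - sc)).flatten := by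
  induction l with
  | nil =>
    intro res sc _
    cases h : 3 - sc with
    | zero => simp [pvCollect, pvSplitSp]
    | succ n => simp [pvCollect, pvSplitSp]
  | cons c cs ih =>
    intro res sc hsc
    by_cases h3 : sc = 3
    · simp [pvCollect, h3]
    · have hsc' : sc < 3 := by omega
      by_cases hc : c = ' '
      · subst hc
        rw [show pvCollect (' ' :: cs) res sc = pvCollect cs res (sc + 1) by
              simp [pvCollect, h3]]
        rw [ih res (sc + 1) (by omega)]
        have : 3 - sc = (3 - (sc + 1)) + 1 := by omega
        simp [pvSplitSp, this]
      · rw [show pvCollect (c :: cs) res sc = pvCollect cs (res ++ [c]) sc by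
              simp [pvCollect, h3, hc]]
        rw [ih (res ++ [c]) sc hsc]
        obtain ⟨h0, t, ht⟩ := List.exists_cons_of_ne_nil (pvSplitSp_ne_nil cs)
        obtain ⟨n, hn⟩ : ∃ n, 3 - sc = n + 1 := ⟨3 - sc - 1, by omega⟩
        rw [hn]
        simp [pvSplitSp, hc, ht, List.modifyHead]

-- ===== VERDICT (by name: the statement is the Claim_ definition above) =====
theorem get_hashtag_from_line_spec : Claim_equal_get_hashtag_from_line := by
  have key : ∀ l : List Char, pvCollect l [] 0
      = PySem.Chars.join [] ((PySem.Chars.splitOn l [' ']).take 3) := by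
    intro l
    rw [pvSplitOn_eq, pvJoinNil, pvCollect_eq l [] 0 (by omega), List.nil_append]
  intro line _
  show String.ofList (pvCollect (line.toList.drop (pvFindHash line.toList 0 + 1)) [] 0)
     = String.ofList (PySem.Chars.join []
         ((PySem.Chars.splitOn (line.toList.drop (pvFindHash line.toList 0 + 1)) [' ']).take 3))
  rw [key]
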